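-- pv_equiv track=rewrite | github.com/giordanoEnzo/SmartSpend | main.py | calcular_repeticao_geral
-- ===== SOURCE A (Python) =====
-- def calcular_repeticao_geral(termos_perguntas, termos_textos):
--     repeticao_termos_perguntas = {}
--
--     for termo_pergunta in termos_perguntas:
--         repeticao_termo = 0
--
--         for id in termos_textos:
--             for termo_chave in termos_textos[id]:
--                 if termo_pergunta == termo_chave:
--                     repeticao_termo += 1
--
--         repeticao_termos_perguntas[termo_pergunta] = repeticao_termo
--
--     return repeticao_termos_perguntas
-- ===== SOURCE B (Python) =====
-- def calcular_repeticao_geral(termos_perguntas, termos_textos):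
--     repeticao = {termo: 0 for termo in termos_perguntas}
--     for termos in termos_textos.values():
--         for termo in termos:
--             if termo in repeticao:
--                 repeticao[termo] += 1
--     return repeticao
-- ===== Notes on version B (the rewrite author's own statement) =====
-- stated objective: faster
-- what changed: B inverts the loop nesting: instead of rescanning the whole corpus once per query term, it pre-builds the zero-initialised result dict and walks the corpus terms exactly once, incrementing counters via dict membership.
import Mathlib
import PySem

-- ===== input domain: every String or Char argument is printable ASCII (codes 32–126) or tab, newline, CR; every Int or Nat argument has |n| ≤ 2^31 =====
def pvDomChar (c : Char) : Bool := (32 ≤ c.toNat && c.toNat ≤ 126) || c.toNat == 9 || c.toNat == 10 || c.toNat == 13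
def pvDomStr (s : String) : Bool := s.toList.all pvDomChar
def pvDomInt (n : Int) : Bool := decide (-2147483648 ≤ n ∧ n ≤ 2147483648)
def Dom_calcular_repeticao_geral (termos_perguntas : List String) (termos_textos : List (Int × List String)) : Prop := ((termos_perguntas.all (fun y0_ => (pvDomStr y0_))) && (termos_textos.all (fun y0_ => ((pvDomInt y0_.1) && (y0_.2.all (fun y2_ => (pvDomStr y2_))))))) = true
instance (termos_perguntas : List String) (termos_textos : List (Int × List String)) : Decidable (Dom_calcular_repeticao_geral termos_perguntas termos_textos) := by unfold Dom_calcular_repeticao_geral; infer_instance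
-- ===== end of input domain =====

-- B builds the zero-initialised result dict once and scans the corpus a single time,
-- incrementing via dict membership, instead of A's per-query rescans of the whole corpus.


-- ===== PORT A =====
-- `for id in termos_textos` iterates the dict's keys; `termos_textos[id]` is the lookup
-- (the key is always present, so the getD default [] is never used).
def calcular_repeticao_geral (termos_perguntas : List String) (termos_textos : List (Int × List String)) : List (String × Int) :=
  (termos_perguntas.foldl (fun rep termo_pergunta =>
      let repeticao_termo : Int :=
        termos_textos.foldl (fun acc p =>
          ((PySem.Dict.mk termos_textos).getD p.1 []).foldl
            (fun acc termo_chave => if termo_pergunta == termo_chave then acc + 1 else acc) acc) 0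
      rep.insert termo_pergunta repeticao_termo)
    PySem.Dict.empty).items

-- ===== PORT B =====
def calcular_repeticao_geral_alt (termos_perguntas : List String) (termos_textos : List (Int × List String)) : List (String × Int) :=
  let repeticao : PySem.Dict String Int :=
    termos_perguntas.foldl (fun d termo => d.insert termo 0) PySem.Dict.empty
  (termos_textos.foldl (fun d p =>
      p.2.foldl (fun d termo => if d.contains termo then d.modify termo 0 (· + 1) else d) d)
    repeticao).items

-- ===== PRECONDITION & SPEC =====
-- Pre_ excludes only association lists with duplicate keys: those do not represent any
-- Python dict argument (A's parameter is a dict, whose keys are necessarily distinct).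
def Pre_calcular_repeticao_geral (termos_perguntas : List String) (termos_textos : List (Int × List String)) : Prop :=
  (termos_textos.map Prod.fst).Nodup
instance (termos_perguntas : List String) (termos_textos : List (Int × List String)) : Decidable (Pre_calcular_repeticao_geral termos_perguntas termos_textos) := by unfold Pre_calcular_repeticao_geral; infer_instance

def pvWitness_calcular_repeticao_geral : List String × (List (Int × List String)) :=
  (["gasto", "mes"], [(1, ["gasto", "total"]), (2, ["mes", "gasto"])])

def Spec_calcular_repeticao_geral (termos_perguntas : List String) (termos_textos : List (Int × List String)) (out : List (String × Int)) : Prop := out = calcular_repeticao_geral_alt termos_perguntas termos_textos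
instance (termos_perguntas : List String) (termos_textos : List (Int × List String)) (out : List (String × Int)) : Decidable (Spec_calcular_repeticao_geral termos_perguntas termos_textos out) := by unfold Spec_calcular_repeticao_geral; infer_instance

-- ===== CLAIM (what is proved, stated in full; the proofs are below) =====
def Claim_equal_calcular_repeticao_geral : Prop := ∀ (termos_perguntas : List String) (termos_textos : List (Int × List String)), Dom_calcular_repeticao_geral termos_perguntas termos_textos → Pre_calcular_repeticao_geral termos_perguntas termos_textos → Spec_calcular_repeticao_geral termos_perguntas termos_textos (calcular_repeticao_geral termos_perguntas termos_textos)

-- ===== LEMMAS AND PROOFS =====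

-- With nodup keys, the lookup of an entry's own key yields its own value.
lemma lookup_self (tt : List (Int × List String)) (h : (tt.map Prod.fst).Nodup)
    {p : Int × List String} (hp : p ∈ tt) :
    (PySem.Dict.mk tt).getD p.1 [] = p.2 := by
  exact PySem.Dict.getD_of_mem_items (PySem.Dict.mk tt) hp (by simpa using h) []

-- A's nested counting fold is the count over the flattened corpus.
lemma countA_eq (t : String) (l : List (Int × List String)) (a : Int) :
    l.foldl (fun acc p =>
      p.2.foldl (fun acc w => if t == w then acc + 1 else acc) acc) a
      = a + ((l.flatMap Prod.snd).count t : Int) := by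
  induction l generalizing a with
  | nil => simp
  | cons p l ih =>
    simp only [List.foldl_cons, ih, List.flatMap_cons, List.count_append]
    have := PySem.List.foldl_count_if (fun w => t == w) p.2 a
    simp only [this]
    have : List.countP (fun w => t == w) p.2 = p.2.count t := by
      exact List.countP_congr (by intro x _; simp [BEq.comm])
    rw [this]; push_cast; ring

-- Folding an insert-of-a-key-function over a list: getD reads the function.
lemma getD_foldl_insert_fn (f : String → Int) (tp : List String) (d : PySem.Dict String Int) (k : String) :
    (tp.foldl (fun d t => d.insert t (f t)) d).getD k 0
      = if k ∈ tp then f k else d.getD k 0 := by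
  induction tp generalizing d with
  | nil => simp
  | cons t tp ih =>
    simp only [List.foldl_cons, ih, List.mem_cons]
    by_cases hk : k ∈ tp
    · simp [hk]
    · by_cases he : k = t
      · simp [he, PySem.Dict.getD_insert_self]
      · simp [hk, he, PySem.Dict.getD_insert_of_ne d (f t) 0 he]

-- B's counting loop never changes the key list …
lemma keys_countB (l : List String) (d : PySem.Dict String Int) :
    (l.foldl (fun d w => if d.contains w then d.modify w 0 (· + 1) else d) d).keys = d.keys := by
  induction l generalizing d with
  | nil => rfl
  | cons w l ih =>
    simp only [List.foldl_cons]
    by_cases hc : d.contains w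
    · rw [ih, if_pos hc, PySem.Dict.keys_modify, PySem.Dict.keys_insert_of_contains d _ hc]
    · simp [hc, ih]
-- … and, on a contained key, adds exactly the number of occurrences.
lemma getD_countB (l : List String) (d : PySem.Dict String Int) (t : String)
    (ht : d.contains t = true) :
    (l.foldl (fun d w => if d.contains w then d.modify w 0 (· + 1) else d) d).getD t 0
      = d.getD t 0 + (l.count t : Int) := by
  induction l generalizing d with
  | nil => simp
  | cons w l ih =>
    simp only [List.foldl_cons, List.count_cons]
    by_cases hc : d.contains w
    · have ht' : (d.modify w 0 (· + 1)).contains t = true := by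
        simp [PySem.Dict.contains_modify, ht]
      rw [if_pos hc, ih _ ht', PySem.Dict.getD_modify]
      by_cases he : t = w
      · simp [he]; ring
      · have hwt : (w == t) = false := by simp [Ne.symm he]
        simp [he, hwt]
    · have he : t ≠ w := fun h => hc (h ▸ ht)
      have hwt : (w == t) = false := by simp [Ne.symm he]
      simp [hc, ih _ ht, hwt]

theorem main_eq (tp : List String) (tt : List (Int × List String))
    (h : (tt.map Prod.fst).Nodup) :
    calcular_repeticao_geral tp tt = calcular_repeticao_geral_alt tp tt := by
  unfold calcular_repeticao_geral calcular_repeticao_geral_alt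
  -- name the two dicts
  set cnt : String → Int := fun t => ((tt.flatMap Prod.snd).count t : Int) with hcnt
  -- rewrite A's per-term count into cnt
  have hA : ∀ (t : String),
      tt.foldl (fun acc p =>
        ((PySem.Dict.mk tt).getD p.1 []).foldl
          (fun acc w => if t == w then acc + 1 else acc) acc) 0 = cnt t := by
    intro t
    rw [PySem.List.foldl_congr_mem tt _
        (fun acc p => p.2.foldl (fun acc w => if t == w then acc + 1 else acc) acc) 0
        (by intro acc p hp; rw [lookup_self tt h hp])]
    simpa using countA_eq t tt 0
  let dA : PySem.Dict String Int := tp.foldl (fun d t => d.insert t (cnt t)) PySem.Dict.empty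
  have hAeq : (tp.foldl (fun rep t =>
      rep.insert t (tt.foldl (fun acc p =>
        ((PySem.Dict.mk tt).getD p.1 []).foldl
          (fun acc w => if t == w then acc + 1 else acc) acc) 0)) PySem.Dict.empty) = dA := by
    apply PySem.List.foldl_congr_mem
    intro acc t _; rw [hA t]
  rw [hAeq]
  -- B side
  set d0 : PySem.Dict String Int := tp.foldl (fun d t => d.insert t 0) PySem.Dict.empty with hd0
  set dB : PySem.Dict String Int :=
    tt.foldl (fun d p =>
      p.2.foldl (fun d w => if d.contains w then d.modify w 0 (· + 1) else d) d) d0 with hdB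
  -- collapse B's nested fold to a flat fold
  have hBflat : dB = (tt.flatMap Prod.snd).foldl
      (fun d w => if d.contains w then d.modify w 0 (· + 1) else d) d0 := by
    rw [hdB, List.foldl_flatMap]
  -- keys
  have hkA : dA.keys = PySem.Set.ofList tp := by
    simpa using PySem.Dict.keys_foldl_insert tp (fun _ t => cnt t) PySem.Dict.empty
  have hk0 : d0.keys = PySem.Set.ofList tp := by
    simpa using PySem.Dict.keys_foldl_insert tp (fun _ _ => (0 : Int)) PySem.Dict.empty
  have hkB : dB.keys = PySem.Set.ofList tp := by
    rw [hBflat, keys_countB, hk0]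
  have hndA : dA.keys.Nodup := hkA ▸ PySem.Set.nodup_ofList tp
  have hndB : dB.keys.Nodup := hkB ▸ PySem.Set.nodup_ofList tp
  -- items equality via keys + getD
  rw [PySem.Dict.items_eq_map_keys dA hndA 0, PySem.Dict.items_eq_map_keys dB hndB 0,
      hkA, hkB]
  apply List.map_congr_left
  intro k hk
  have hkmem : k ∈ tp := (PySem.Set.mem_ofList tp k).mp hk
  have h1 : dA.getD k 0 = cnt k := by
    rw [getD_foldl_insert_fn cnt tp PySem.Dict.empty k]; simp [hkmem]
  have h2 : d0.getD k 0 = 0 := by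
    rw [hd0, getD_foldl_insert_fn (fun _ => (0 : Int)) tp PySem.Dict.empty k]; simp
  have hc0 : d0.contains k = true := by
    rw [PySem.Dict.contains_iff_mem_keys, hk0, PySem.Set.mem_ofList]; exact hkmem
  have h3 : dB.getD k 0 = cnt k := by
    rw [hBflat, getD_countB _ _ _ hc0, h2, hcnt]; simp [List.count]
  rw [h1, h3]

-- ===== VERDICT (by name: the statement is the Claim_ definition above) =====
theorem calcular_repeticao_geral_spec : Claim_equal_calcular_repeticao_geral := by
  intro tp tt _ hpre
  unfold Spec_calcular_repeticao_geral
  exact main_eq tp tt hpre
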